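-- pv_equiv track=rewrite | github.com/AJTown/interview-questions | questions.py | longest_common_word
-- ===== SOURCE A (Python) =====
-- def longest_common_word(first, second):
--     longestCommonWord = ''
--     lenLongestWord = 0
--     for word in first:
--         if lenLongestWord == 0:
--             if word in second:
--                 longestCommonWord = word
--                 lenLongestWord = len(word)
--             else:
--                 continue
--         else:
--             if len(word) > lenLongestWord:
--                 if word in second:
--                     longestCommonWord = word
--                     lenLongestWord = len(word)
--                 else:
--                     continue
--             else:
--                 continue
--     return longestCommonWord
--
--     raise Exception('Not implemented')
-- ===== SOURCE B (Python) =====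
-- def longest_common_word(first, second):
--     seconds = set(second)
--     candidates = [w for w in first if w in seconds]
--     candidates.sort(key=len, reverse=True)  # stable: earliest among equal lengths stays first
--     return candidates[0] if candidates else ''
-- ===== Notes on version B (the rewrite author's own statement) =====
-- stated objective: alternative
-- what changed: Replaces A's running-max scan (with its zero-length and strictly-greater branching) by hashing second into a set, filtering first to the common words, stably sorting them by length descending and taking the head.
import Mathlib
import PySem

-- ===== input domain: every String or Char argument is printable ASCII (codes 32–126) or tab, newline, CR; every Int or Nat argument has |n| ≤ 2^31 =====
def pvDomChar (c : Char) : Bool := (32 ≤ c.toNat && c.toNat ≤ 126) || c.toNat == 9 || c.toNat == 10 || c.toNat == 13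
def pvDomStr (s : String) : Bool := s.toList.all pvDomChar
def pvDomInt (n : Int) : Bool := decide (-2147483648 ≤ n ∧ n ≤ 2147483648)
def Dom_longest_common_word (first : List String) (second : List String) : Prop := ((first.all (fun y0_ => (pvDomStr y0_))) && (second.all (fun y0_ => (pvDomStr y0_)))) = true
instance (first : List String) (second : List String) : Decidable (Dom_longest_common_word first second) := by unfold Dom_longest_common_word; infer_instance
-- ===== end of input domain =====

-- B replaces A's running-max scan by filter + stable descending sort by length + head (objective: alternative).

-- ===== PORT A =====
-- running state: (longestCommonWord, lenLongestWord)
def longest_common_word (first : List String) (second : List String) : String :=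
  (first.foldl (fun (st : String × Int) word =>
    if st.2 == 0 then
      if second.contains word then (word, PySem.Str.len word) else st
    else
      if PySem.Str.len word > st.2 then
        if second.contains word then (word, PySem.Str.len word) else st
      else st) ("", 0)).1

-- ===== PORT B =====
def longest_common_word_alt (first : List String) (second : List String) : String :=
  let seconds := PySem.Set.ofList second
  let candidates := first.filter (fun w => seconds.contains w)
  let sortedCands := PySem.List.sorted candidates PySem.Str.len true
  sortedCands.headD ""

-- ===== PRECONDITION & SPEC =====
def Spec_longest_common_word (first : List String) (second : List String) (out : String) : Prop := out = longest_common_word_alt first second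
instance (first : List String) (second : List String) (out : String) : Decidable (Spec_longest_common_word first second out) := by unfold Spec_longest_common_word; infer_instance

-- ===== CLAIM (what is proved, stated in full; the proofs are below) =====
def Claim_equal_longest_common_word : Prop := ∀ (first : List String) (second : List String), Dom_longest_common_word first second → Spec_longest_common_word first second (longest_common_word first second)

-- ===== LEMMAS AND PROOFS =====

-- the value-level running-max step both fold shapes reduce to
def pvMaxStep (a w : String) : String :=
  if PySem.Str.len a < PySem.Str.len w then w else a

-- A's paired fold keeps the invariant st = (r, len r) and is the guarded running max
lemma pvA_fold (second : List String) (c : List String) (a : String) :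
    c.foldl (fun (st : String × Int) word =>
      if st.2 == 0 then
        if second.contains word then (word, PySem.Str.len word) else st
      else
        if PySem.Str.len word > st.2 then
          if second.contains word then (word, PySem.Str.len word) else st
        else st) (a, PySem.Str.len a)
    = (c.foldl (fun a w => if second.contains w then pvMaxStep a w else a) a,
       PySem.Str.len (c.foldl (fun a w => if second.contains w then pvMaxStep a w else a) a)) := by
  induction c generalizing a with
  | nil => rfl
  | cons w t ih =>
    simp only [List.foldl_cons]
    have hstep : (if PySem.Str.len a == 0 then
        if second.contains w then (w, PySem.Str.len w) else (a, PySem.Str.len a)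
      else
        if PySem.Str.len w > PySem.Str.len a then
          if second.contains w then (w, PySem.Str.len w) else (a, PySem.Str.len a)
        else (a, PySem.Str.len a))
        = ((if second.contains w then pvMaxStep a w else a),
           PySem.Str.len (if second.contains w then pvMaxStep a w else a)) := by
      by_cases hz : a = ""
      · subst hz
        by_cases hc : w ∈ second
        · by_cases hw : w = ""
          · subst hw; simp [pvMaxStep]
          · have hpos : 0 < w.length := by
              rcases Nat.eq_zero_or_pos w.length with h | h
              · exact absurd (String.length_eq_zero_iff.mp h) hw
              · exact h
            simp [pvMaxStep, hc, hpos]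
        · simp [hc]
      · have hz' : a.length ≠ 0 := fun h => hz (String.length_eq_zero_iff.mp h)
        by_cases hlt : a.length < w.length
        · by_cases hc : w ∈ second <;> simp [pvMaxStep, hc, hlt, hz']
        · by_cases hc : w ∈ second <;> simp [pvMaxStep, hc, hlt, hz']
    rw [hstep, ih]

-- head of an insertBy step = running-max step applied to the head (with "" for the empty list)
lemma pv_head_insertBy (x : String) (ys : List String) :
    (PySem.List.insertBy (fun a b => decide (PySem.Str.len b < PySem.Str.len a)) x ys).headD ""
      = pvMaxStep (ys.headD "") x := by
  cases ys with
  | nil =>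
    by_cases hw : x = ""
    · subst hw; simp [PySem.List.insertBy, pvMaxStep]
    · have hpos : 0 < x.length := by
        rcases Nat.eq_zero_or_pos x.length with h | h
        · exact absurd (String.length_eq_zero_iff.mp h) hw
        · exact h
      simp [PySem.List.insertBy, pvMaxStep, hpos]
  | cons y t =>
    by_cases h : y.length < x.length <;>
      simp [PySem.List.insertBy, pvMaxStep, h]

-- the head of the stable descending sort by length is the running max over the list
lemma pv_sorted_head (c : List String) :
    (PySem.List.sorted c PySem.Str.len true).headD ""
      = c.foldl pvMaxStep "" := by
  rw [PySem.List.sorted_rev_eq_foldl_insertBy]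
  have := List.foldl_hom (fun (l : List String) => l.headD "")
    (g₁ := fun acc x => PySem.List.insertBy (fun a b => decide (PySem.Str.len b < PySem.Str.len a)) x acc)
    (g₂ := fun a x => pvMaxStep a x)
    (l := c) (init := ([] : List String))
    (fun l x => (pv_head_insertBy x l).symm)
  simpa using this.symm

-- ===== VERDICT (by name: the statement is the Claim_ definition above) =====
theorem longest_common_word_spec : Claim_equal_longest_common_word := by
  intro first second _
  show longest_common_word first second = longest_common_word_alt first second
  unfold longest_common_word longest_common_word_alt
  have h0 : ((("" : String), (0 : Int))) = (("" : String), PySem.Str.len "") := by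
    simp [PySem.Str.len_eq]
  show _ = (PySem.List.sorted (List.filter (fun w => (PySem.Set.ofList second).contains w) first) PySem.Str.len true).headD ""
  have hpred : (fun w => (PySem.Set.ofList second).contains w) = (fun w => second.contains w) :=
    funext fun w => by simp [PySem.Set.mem_ofList]
  rw [h0, pvA_fold, hpred, pv_sorted_head,
    PySem.List.foldl_if_eq_foldl_filter (fun w => second.contains w) pvMaxStep first ""]
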